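-- pv_equiv track=rewrite | github.com/ErillLab/FLEMINGO | src/objects/organism_object.py | annotate_required_connectors
-- ===== SOURCE A (Python) =====
-- def annotate_required_connectors(child_repres):
--     '''
--     Returns the list of the connectors' spans required to join the
--     recognizers, given the representation of the organism (a newly
--     generated child). Each element of the list is a tuple of two element,
--     where the first one is the index position of the recognizer to the left,
--     while the secind one is the index position of the recognizer to the right.
--
--     EXAMPLE:
--     In this representation
--
--         p1_0    p2_0    -       p1_2
--
--     A connector is needed to link 'p1_0', which is at index position 0, to
--     'p2_0', which is at index position 1. Another connector is needed to
--     link 'p2_0' with 'p1_2', which is at index position 3. Therefore, the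
--     returned list of required connectors would be
--
--         [ (0, 1), (1, 3) ]
--
--     In case of repetitions (due to a recognizer overlapping with more than
--     one recog in the alignment of the organisms), no recognizer is needed.
--
--     EXAMPLE:
--     In this representation
--
--         p1_0    -       p1_1    p1_1    p2_3
--
--     The returned list of required connectors would be
--
--         [ (0, 2), (2, 3) ]
--
--     No connector is needed for index 2 to index 3: positions that are both
--     occupied by the same recognizer ('p1_1').
--
--     '''
--     # Indexes where there is a recognizer
--     recogs_indexes = []
--     for idx in range(len(child_repres)):
--         if child_repres[idx] != '-':
--             recogs_indexes.append(idx)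
--
--     required_connectors = []
--     for i in range(len(recogs_indexes)-1):
--
--         left_recog_index = recogs_indexes[i]
--         right_recog_index = recogs_indexes[i+1]
--
--         left_recog_name = child_repres[left_recog_index]
--         right_recog_name = child_repres[right_recog_index]
--
--         # No connector is needed to link a recognizer with itself (see
--         # function's docstring).
--         if left_recog_name != right_recog_name:
--             connector_span = (left_recog_index, right_recog_index)
--             required_connectors.append(connector_span)
--
--     return required_connectors
-- ===== SOURCE B (Python) =====
-- def annotate_required_connectors(child_repres):
--     required_connectors = []
--     prev_idx = None
--     prev_name = None
--     for idx, name in enumerate(child_repres):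
--         if name != '-':
--             if prev_idx is not None and prev_name != name:
--                 required_connectors.append((prev_idx, idx))
--             prev_idx = idx
--             prev_name = name
--     return required_connectors
-- ===== Notes on version B (the rewrite author's own statement) =====
-- stated objective: simpler
-- what changed: Replaces A's two passes (collect all recognizer indexes, then re-index into the representation to pair adjacent ones) with a single pass over enumerate that keeps only the previous recognizer's index and name; the intermediate index list disappears.
import Mathlib
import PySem

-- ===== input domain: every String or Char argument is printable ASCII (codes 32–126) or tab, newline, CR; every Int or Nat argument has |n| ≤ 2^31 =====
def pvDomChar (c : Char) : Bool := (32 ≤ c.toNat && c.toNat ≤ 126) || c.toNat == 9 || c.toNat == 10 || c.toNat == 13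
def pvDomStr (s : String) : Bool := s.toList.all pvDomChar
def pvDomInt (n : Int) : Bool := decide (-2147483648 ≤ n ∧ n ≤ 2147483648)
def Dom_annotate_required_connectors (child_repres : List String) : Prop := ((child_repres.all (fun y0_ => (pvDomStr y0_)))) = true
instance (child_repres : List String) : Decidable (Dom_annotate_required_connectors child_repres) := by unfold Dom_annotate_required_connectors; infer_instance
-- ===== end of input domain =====

-- B replaces A's two passes by a single pass keeping only the previous recognizer's index and name (objective: simpler).

-- ===== PORT A =====
-- literal transliteration of A: first loop collects recognizer indexes, second loop pairs adjacent distinct ones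
def annotate_required_connectors (child_repres : List String) : List (Int × Int) :=
  let recogs_indexes : List Int :=
    (PySem.List.pyRange 0 (PySem.List.len child_repres) 1).foldl
      (fun acc idx =>
        if PySem.List.pyGetD child_repres idx "" ≠ "-" then acc ++ [idx] else acc) []
  (PySem.List.pyRange 0 (PySem.List.len recogs_indexes - 1) 1).foldl
    (fun acc i =>
      let left_recog_index := PySem.List.pyGetD recogs_indexes i 0
      let right_recog_index := PySem.List.pyGetD recogs_indexes (i + 1) 0
      let left_recog_name := PySem.List.pyGetD child_repres left_recog_index ""
      let right_recog_name := PySem.List.pyGetD child_repres right_recog_index ""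
      if left_recog_name ≠ right_recog_name then acc ++ [(left_recog_index, right_recog_index)]
      else acc) []

-- ===== PORT B =====
-- one step of B's loop body: state = (previous recognizer (index, name) if any, output so far)
def pvBGo (st : Option (Int × String) × List (Int × Int)) (p : Int × String) :
    Option (Int × String) × List (Int × Int) :=
  (some (p.1, p.2),
    match st.1 with
    | some prev => if prev.2 ≠ p.2 then st.2 ++ [(prev.1, p.1)] else st.2
    | none => st.2)

def pvBStep (st : Option (Int × String) × List (Int × Int)) (p : Int × String) :
    Option (Int × String) × List (Int × Int) :=
  if p.2 ≠ "-" then pvBGo st p else st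

def annotate_required_connectors_alt (child_repres : List String) : List (Int × Int) :=
  ((PySem.List.enumerate child_repres 0).foldl pvBStep (none, [])).2

-- ===== PRECONDITION & SPEC =====
def Spec_annotate_required_connectors (child_repres : List String) (out : List (Int × Int)) : Prop := out = annotate_required_connectors_alt child_repres
instance (child_repres : List String) (out : List (Int × Int)) : Decidable (Spec_annotate_required_connectors child_repres out) := by unfold Spec_annotate_required_connectors; infer_instance

-- ===== CLAIM (what is proved, stated in full; the proofs are below) =====
def Claim_equal_annotate_required_connectors : Prop := ∀ (child_repres : List String), Dom_annotate_required_connectors child_repres → Spec_annotate_required_connectors child_repres (annotate_required_connectors child_repres)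

-- ===== LEMMAS AND PROOFS =====

-- the common value: adjacent pairs of distinct-named recognizers
def pvChain : List (Int × String) → List (Int × Int)
  | [] => []
  | [_] => []
  | a :: b :: t => (if a.2 ≠ b.2 then [(a.1, b.1)] else []) ++ pvChain (b :: t)

theorem pvChain_nil : pvChain [] = [] := rfl
theorem pvChain_single (a : Int × String) : pvChain [a] = [] := rfl

-- B-side: folding pvBGo over the recognizer list with a previous recognizer
theorem pvB_fold_some (M : List (Int × String)) :
    ∀ (a : Int × String) (acc : List (Int × Int)),
    (M.foldl pvBGo (some a, acc)).2 = acc ++ pvChain (a :: M) := by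
  induction M with
  | nil => intro a acc; simp [pvChain_single]
  | cons p M ih =>
    intro a acc
    have step : pvBGo (some a, acc) p
        = (some (p.1, p.2), acc ++ if a.2 ≠ p.2 then [(a.1, p.1)] else []) := by
      simp only [pvBGo]
      split_ifs <;> simp
    simp only [List.foldl_cons, step]
    rw [ih (p.1, p.2) _]
    show _ = acc ++ pvChain (a :: p :: M)
    rw [pvChain]
    cases p
    split_ifs <;> simp

theorem pvB_fold_none (M : List (Int × String)) (acc : List (Int × Int)) :
    (M.foldl pvBGo (none, acc)).2 = acc ++ pvChain M := by
  cases M with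
  | nil => simp [pvChain_nil]
  | cons p M =>
    have step : pvBGo (none, acc) p = (some (p.1, p.2), acc) := rfl
    simp only [List.foldl_cons, step]
    rw [pvB_fold_some M (p.1, p.2) acc]

-- A-side: the index-pairing loop over a list of (index, name) pairs equals pvChain
theorem pvA_loop_chain (xs : List String) :
    ∀ (M : List (Int × String)) (acc : List (Int × Int)),
    (∀ p ∈ M, PySem.List.pyGetD xs p.1 "" = p.2) →
    (List.range (M.length - 1)).foldl
      (fun acc k =>
        if PySem.List.pyGetD xs ((M.map Prod.fst).getD k 0) ""
            ≠ PySem.List.pyGetD xs ((M.map Prod.fst).getD (k + 1) 0) "" then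
          acc ++ [((M.map Prod.fst).getD k 0, (M.map Prod.fst).getD (k + 1) 0)]
        else acc) acc
    = acc ++ pvChain M := by
  intro M
  match M with
  | [] => intro acc _; simp [pvChain_nil]
  | [a] => intro acc _; simp [pvChain_single]
  | a :: b :: t =>
    intro acc h
    have ha : PySem.List.pyGetD xs a.1 "" = a.2 := h a (by simp)
    have hb : PySem.List.pyGetD xs b.1 "" = b.2 := h b (by simp)
    have hlen : (a :: b :: t).length - 1 = t.length + 1 := by simp
    rw [hlen, List.range_succ_eq_map, List.foldl_cons, List.foldl_map]
    have step0 : (if PySem.List.pyGetD xs (((a :: b :: t).map Prod.fst).getD 0 0) ""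
            ≠ PySem.List.pyGetD xs (((a :: b :: t).map Prod.fst).getD (0 + 1) 0) "" then
          acc ++ [(((a :: b :: t).map Prod.fst).getD 0 0, ((a :: b :: t).map Prod.fst).getD (0 + 1) 0)]
        else acc) = acc ++ (if a.2 ≠ b.2 then [(a.1, b.1)] else []) := by
      simp [ha, hb]
      split_ifs <;> simp
    rw [step0]
    have hshift : ∀ (acc' : List (Int × Int)),
        (List.range ((b :: t).length - 1)).foldl
          (fun acc k =>
            if PySem.List.pyGetD xs (((a :: b :: t).map Prod.fst).getD (k + 1) 0) ""
                ≠ PySem.List.pyGetD xs (((a :: b :: t).map Prod.fst).getD (k + 1 + 1) 0) "" then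
              acc ++ [(((a :: b :: t).map Prod.fst).getD (k + 1) 0,
                       ((a :: b :: t).map Prod.fst).getD (k + 1 + 1) 0)]
            else acc) acc'
        = acc' ++ pvChain (b :: t) := by
      intro acc'
      have := pvA_loop_chain xs (b :: t) acc' (fun q hq => h q (by simp [List.mem_cons] at hq ⊢; tauto))
      rw [← this]
      apply PySem.List.foldl_congr_mem
      intro acc'' k _
      simp
    have hlen2 : t.length = (b :: t).length - 1 := by simp
    rw [hlen2, hshift]
    rw [pvChain]
    split_ifs <;> simp

-- names looked up at enumerated positions are the enumerated names
theorem pvEnum_lookup (xs : List String) (p : Int × String)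
    (hp : p ∈ PySem.List.enumerate xs 0) : PySem.List.pyGetD xs p.1 "" = p.2 := by
  rw [PySem.List.mem_enumerate_iff] at hp
  obtain ⟨k, hk, rfl⟩ := hp
  simp [PySem.List.pyGetD_natCast, List.getD_eq_getElem?_getD, hk]

-- ===== VERDICT (by name: the statement is the Claim_ definition above) =====
theorem annotate_required_connectors_spec : Claim_equal_annotate_required_connectors := by
  intro xs _
  unfold Spec_annotate_required_connectors
  set L : List (Int × String) := (PySem.List.enumerate xs 0).filter (fun p => p.2 ≠ "-") with hL
  have hLmem : ∀ p ∈ L, PySem.List.pyGetD xs p.1 "" = p.2 := by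
    intro p hp
    exact pvEnum_lookup xs p (List.mem_of_mem_filter hp)
  -- B equals pvChain L
  have hB : annotate_required_connectors_alt xs = pvChain L := by
    unfold annotate_required_connectors_alt
    rw [show pvBStep = (fun st (p : Int × String) => if p.2 ≠ "-" then pvBGo st p else st) from rfl]
    rw [PySem.List.foldl_ite_eq_foldl_filter]
    rw [pvB_fold_none]
    simp [hL]
  -- A's first loop equals L.map Prod.fst
  have hRec : (PySem.List.pyRange 0 (PySem.List.len xs) 1).foldl
      (fun acc idx => if PySem.List.pyGetD xs idx "" ≠ "-" then acc ++ [idx] else acc)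
      ([] : List Int) = L.map Prod.fst := by
    rw [PySem.List.foldl_append_ite_eq_filter]
    rw [hL, PySem.List.enumerate_eq_map_pyRange xs ""]
    rw [List.filter_map, List.map_map]
    simp [Function.comp_def]
  rw [hB]
  simp only [annotate_required_connectors, hRec]
  -- turn the Int range into a Nat range and apply pvA_loop_chain
  have hn : ((PySem.List.len (L.map Prod.fst) - 1) - 0).toNat = L.length - 1 := by
    simp [PySem.List.len_eq]
  rw [PySem.List.pyRange_one, hn, List.foldl_map]
  have hA := pvA_loop_chain xs L [] hLmem
  rw [List.nil_append] at hA
  rw [← hA]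
  apply PySem.List.foldl_congr_mem
  intro acc k _
  have h1 : (0 : Int) + (k : Int) = ((k : Nat) : Int) := by ring
  have h2 : ((k : Int) + 1) = (((k + 1 : Nat)) : Int) := by push_cast; ring
  simp only [h1, h2, PySem.List.pyGetD_natCast]
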